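-- pv_equiv track=rewrite | github.com/Dhravya/autochords-backend | helpers.py | transpose_to_easy_key
-- ===== SOURCE A (Python) =====
-- def split_chord(chord):
--     """Splits a chord into its root and quality."""
--     if chord[-3:] == 'dim':
--         return chord[:-3], 'dim'
--     if chord[-1] == 'm':
--         return chord[:-1], 'm'
--     return chord, ''
--
-- def transpose_to_easy_key(song_structure):
--     """TODO: A WAY TO TRANSPOSE TO EASY CHORDS WITH CAPO"""
--     # Define transposition table
--     chords = ['C', 'C#', 'D', 'D#', 'E', 'F', 'F#', 'G', 'G#', 'A', 'A#', 'B']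
--
--     easy_keys = {
--         'G': ['G', 'Am', 'Bm', 'C', 'D', 'Em', 'F#dim'],
--         'C': ['C', 'Dm', 'Em', 'F', 'G', 'Am', 'Bdim']
--     }
--
--     # Function to determine number of steps to transpose from chord1 to chord2
--     def steps_between_chords(chord1, chord2):
--         root1, _ = split_chord(chord1)
--         root2, _ = split_chord(chord2)
--         index1 = chords.index(root1)
--         index2 = chords.index(root2)
--         return (index2 - index1) % 12
--
--     # Determine best key to transpose to
--     best_key = None
--     fewest_steps = float('inf')
--     capo_position = 0
--
--     for key, key_chords in easy_keys.items():
--         total_steps = 0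
--         for section, section_chords in song_structure.items():
--             for chord in section_chords:
--                 min_steps = min([steps_between_chords(chord, key_chord) for key_chord in key_chords])
--                 total_steps += min_steps
--         if total_steps < fewest_steps:
--             best_key = key
--             fewest_steps = total_steps
--
--     # Now transpose the song to the best key
--     new_song_structure = {}
--     for section, section_chords in song_structure.items():
--         new_song_structure[section] = []
--         for chord in section_chords:
--             root, quality = split_chord(chord)
--             steps_to_key = steps_between_chords(chord, best_key)
--             new_chord_index = (chords.index(root) + steps_to_key) % 12
--             new_chord = chords[new_chord_index] + quality
--             new_song_structure[section].append(new_chord)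
--
--     capo_position = steps_between_chords('C', best_key)
--
--     return capo_position, new_song_structure
-- ===== SOURCE B (Python) =====
-- # Different algorithm: one pass builds a 12-bucket pitch-class histogram, cost tables come
-- # from a backward distance-to-next-scale-tone sweep, and each key is scored as a dot product
-- # histogram . cost (instead of A's per-chord min over the key's chord spellings); the output
-- # chord is emitted directly as best_key + quality.
-- _NOTES = ['C', 'C#', 'D', 'D#', 'E', 'F', 'F#', 'G', 'G#', 'A', 'A#', 'B']
--
--
-- def _split(chord):
--     if chord[-3:] == 'dim':
--         return chord[:-3], 'dim'
--     if chord[-1] == 'm':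
--         return chord[:-1], 'm'
--     return chord, ''
--
--
-- def _cost_table(roots):
--     """cost[i] = upward semitone distance from pitch class i to the nearest scale root,
--     computed by two backward sweeps (the second pass fixes the wrap-around)."""
--     in_scale = [False] * 12
--     for r in roots:
--         in_scale[r] = True
--     cost = [0] * 12
--     d = 0
--     for _ in range(2):
--         for i in range(11, -1, -1):
--             d = 0 if in_scale[i] else d + 1
--             cost[i] = d
--     return cost
--
--
-- def transpose_to_easy_key(song_structure):
--     cost_g = _cost_table([7, 9, 11, 0, 2, 4, 6])
--     cost_c = _cost_table([0, 2, 4, 5, 7, 9, 11])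
--     counts = [0] * 12
--     for section_chords in song_structure.values():
--         for chord in section_chords:
--             counts[_NOTES.index(_split(chord)[0])] += 1
--     score_g = sum(n * w for n, w in zip(counts, cost_g))
--     score_c = sum(n * w for n, w in zip(counts, cost_c))
--     best_key = 'C' if score_c < score_g else 'G'
--     new_song_structure = {s: [best_key + _split(c)[1] for c in cs]
--                           for s, cs in song_structure.items()}
--     return _NOTES.index(best_key), new_song_structure
-- ===== Notes on version B (the rewrite author's own statement) =====
-- stated objective: alternative
-- what changed: B aggregates the song once into a 12-bucket pitch-class histogram, derives each key's 12-entry cost table by a backward distance-to-next-scale-tone sweep, and scores a key as the dot product histogram.cost, instead of A's per-chord min over both keys' seven chord spellings with repeated list.index scans; the output chord is emitted directly as best_key+quality since A's transposition arithmetic always lands on the best key's root. …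
import Mathlib
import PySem

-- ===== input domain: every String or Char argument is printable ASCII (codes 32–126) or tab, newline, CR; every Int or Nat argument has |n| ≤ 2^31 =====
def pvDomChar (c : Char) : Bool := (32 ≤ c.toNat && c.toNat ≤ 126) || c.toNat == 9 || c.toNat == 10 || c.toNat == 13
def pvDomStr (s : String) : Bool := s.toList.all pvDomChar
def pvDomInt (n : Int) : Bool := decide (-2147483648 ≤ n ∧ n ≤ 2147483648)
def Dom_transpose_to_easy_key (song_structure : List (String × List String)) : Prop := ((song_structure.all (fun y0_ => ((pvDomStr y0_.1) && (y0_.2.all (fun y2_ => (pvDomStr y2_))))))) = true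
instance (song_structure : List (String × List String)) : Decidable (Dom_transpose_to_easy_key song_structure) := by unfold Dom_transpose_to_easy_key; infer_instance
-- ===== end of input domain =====

-- B scores keys by a 12-bucket pitch-class histogram dotted with sweep-computed cost tables
-- instead of A's per-chord min over each key's chord spellings, and emits best_key + quality
-- directly.  Equivalence of the RETURN value is proved on Pre_.

-- ===== PORT A =====
def pvChords : List String := ["C","C#","D","D#","E","F","F#","G","G#","A","A#","B"]

def pvEasyKeys : List (String × List String) :=
  [("G", ["G","Am","Bm","C","D","Em","F#dim"]), ("C", ["C","Dm","Em","F","G","Am","Bdim"])]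

def pvSplitChord (chord : String) : String × String :=
  if PySem.Str.slice chord (some (-3)) none == "dim" then (PySem.Str.slice chord none (some (-3)), "dim")
  else if PySem.Str.pyGet? chord (-1) == some 'm' then (PySem.Str.slice chord none (some (-1)), "m")
  else (chord, "")

-- chords.index(root): raises ValueError when root is missing; Pre_ keeps every root inside pvChords,
-- so the .getD 0 stand-in is never the raising case on admitted inputs
def pvIdx (r : String) : Int := (((PySem.List.index? pvChords r).getD 0 : Nat) : Int)

def pvSteps (c1 c2 : String) : Int :=
  PySem.Int.mod (pvIdx (pvSplitChord c2).1 - pvIdx (pvSplitChord c1).1) 12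

-- min([...]) over the (nonempty) key-chord list
def pvMinSteps (chord : String) (key_chords : List String) : Int :=
  (PySem.List.min? (key_chords.map (fun kc => pvSteps chord kc)) (fun x => x)).getD 0

def pvTotal (song : List (String × List String)) (key_chords : List String) : Int :=
  song.foldl (fun tot sec => sec.2.foldl (fun t c => t + pvMinSteps c key_chords) tot) 0

-- best_key/fewest_steps loop; (none, none) is (None, inf)
def pvBestKey (song : List (String × List String)) : Option String × Option Int :=
  pvEasyKeys.foldl (fun st kv =>
    let total := pvTotal song kv.2
    match st.2 with
    | none => (some kv.1, some total)
    | some f => if total < f then (some kv.1, some total) else st) (none, none)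

def pvEmitChord (best chord : String) : String :=
  let rq := pvSplitChord chord
  let steps := pvSteps chord best
  let ni := PySem.Int.mod (pvIdx rq.1 + steps) 12
  PySem.List.pyGetD pvChords ni "" ++ rq.2

def transpose_to_easy_key (song_structure : List (String × List String)) : Int × (List (String × List String)) :=
  let best := (pvBestKey song_structure).1.getD ""
  let newd := song_structure.foldl (fun d sec =>
      sec.2.foldl (fun d c => PySem.Dict.modify d sec.1 [] (fun xs => xs ++ [pvEmitChord best c]))
        (PySem.Dict.insert d sec.1 []))
    (PySem.Dict.mk ([] : List (String × List String)))
  (pvSteps "C" best, newd.items)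

-- ===== PORT B =====
def pvBNotes : List String := ["C","C#","D","D#","E","F","F#","G","G#","A","A#","B"]

def pvBSplit (chord : String) : String × String :=
  if PySem.Str.slice chord (some (-3)) none == "dim" then (PySem.Str.slice chord none (some (-3)), "dim")
  else if PySem.Str.pyGet? chord (-1) == some 'm' then (PySem.Str.slice chord none (some (-1)), "m")
  else (chord, "")

-- _NOTES.index(s): raises ValueError when missing; Pre_ keeps every root inside the twelve notes
def pvBIdx (s : String) : Int := (((PySem.List.index? pvBNotes s).getD 0 : Nat) : Int)

-- Source B's _cost_table: in_scale marks, then two backward sweeps carrying the running distance d;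
-- the indices written (roots 0..11 and range(11,-1,-1)) are nonnegative, so .toNat is exact here
def pvBCostTable (roots : List Int) : List Int :=
  let in_scale := roots.foldl (fun s r => s.set r.toNat true) (List.replicate 12 false)
  let pass := fun (st : List Int × Int) =>
    (PySem.List.pyRange 11 (-1) (-1)).foldl
      (fun st i =>
        let d := if in_scale.getD i.toNat false then 0 else st.2 + 1
        (st.1.set i.toNat d, d)) st
  (pass (pass (List.replicate 12 (0:Int), 0))).1

-- counts[idx] += 1 (idx is a Nat cast, hence nonnegative; in range on Pre_-admitted chords)
def pvBInc (counts : List Int) (c : String) : List Int :=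
  counts.set (pvBIdx (pvBSplit c).1).toNat (counts.getD (pvBIdx (pvBSplit c).1).toNat 0 + 1)

-- sum(n * w for n, w in zip(counts, cost))
def pvBDot (a b : List Int) : Int := (List.zipWith (fun n w => n * w) a b).sum

def transpose_to_easy_key_alt (song_structure : List (String × List String)) : Int × (List (String × List String)) :=
  let cost_g := pvBCostTable [7, 9, 11, 0, 2, 4, 6]
  let cost_c := pvBCostTable [0, 2, 4, 5, 7, 9, 11]
  let counts := song_structure.foldl (fun counts sec => sec.2.foldl pvBInc counts)
    (List.replicate 12 (0:Int))
  let score_g := pvBDot counts cost_g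
  let score_c := pvBDot counts cost_c
  let best := if score_c < score_g then "C" else "G"
  -- Source B's dict comprehension over song_structure.items(): keys of a dict are unique, so it is the in-order map
  (pvBIdx best, song_structure.map (fun sec => (sec.1, sec.2.map (fun c => best ++ (pvBSplit c).2))))

-- ===== PRECONDITION & SPEC =====
-- the 36 chord spellings whose root is one of A's twelve notes
def pvValidChords : List String :=
  ["C","Cm","Cdim","C#","C#m","C#dim","D","Dm","Ddim","D#","D#m","D#dim",
   "E","Em","Edim","F","Fm","Fdim","F#","F#m","F#dim","G","Gm","Gdim",
   "G#","G#m","G#dim","A","Am","Adim","A#","A#m","A#dim","B","Bm","Bdim"]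

-- Pre_ excludes duplicate section names (A's parameter is a dict, in which they cannot occur, so the
-- assoc-list behaviour there is unspecified) and chords whose root is not one of the twelve notes
-- (A raises ValueError, or IndexError on the empty chord).
def Pre_transpose_to_easy_key (song_structure : List (String × List String)) : Prop :=
  (song_structure.map Prod.fst).Nodup ∧
  ∀ sec ∈ song_structure, ∀ c ∈ sec.2, c ∈ pvValidChords

instance (song_structure : List (String × List String)) : Decidable (Pre_transpose_to_easy_key song_structure) := by
  unfold Pre_transpose_to_easy_key; infer_instance

def pvWitness_transpose_to_easy_key : (List (String × List String)) :=
  [("verse", ["C", "G", "Am"]), ("chorus", ["F", "A#m"])]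

def Spec_transpose_to_easy_key (song_structure : List (String × List String)) (out : Int × (List (String × List String))) : Prop := out = transpose_to_easy_key_alt song_structure
instance (song_structure : List (String × List String)) (out : Int × (List (String × List String))) : Decidable (Spec_transpose_to_easy_key song_structure out) := by unfold Spec_transpose_to_easy_key; infer_instance

-- ===== CLAIM (what is proved, stated in full; the proofs are below) =====
def Claim_equal_transpose_to_easy_key : Prop := ∀ (song_structure : List (String × List String)), Dom_transpose_to_easy_key song_structure → Pre_transpose_to_easy_key song_structure → Spec_transpose_to_easy_key song_structure (transpose_to_easy_key song_structure)

-- ===== LEMMAS AND PROOFS =====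

-- A's per-chord min over a key's chord spellings equals B's sweep-computed cost at the root's
-- pitch class, checked by computation over the 36 valid chords
theorem pv_score_g (c : String) (hc : c ∈ pvValidChords) :
    pvMinSteps c ["G","Am","Bm","C","D","Em","F#dim"]
      = (pvBCostTable [7, 9, 11, 0, 2, 4, 6]).getD (pvBIdx (pvBSplit c).1).toNat 0 := by
  fin_cases hc <;> decide

theorem pv_score_c (c : String) (hc : c ∈ pvValidChords) :
    pvMinSteps c ["C","Dm","Em","F","G","Am","Bdim"]
      = (pvBCostTable [0, 2, 4, 5, 7, 9, 11]).getD (pvBIdx (pvBSplit c).1).toNat 0 := by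
  fin_cases hc <;> decide

theorem pv_idx_lt (c : String) (hc : c ∈ pvValidChords) : (pvBIdx (pvBSplit c).1).toNat < 12 := by
  fin_cases hc <;> decide

-- A's transposition arithmetic lands exactly on the best key's root
theorem pv_emit (b c : String) (hb : b = "G" ∨ b = "C") (hc : c ∈ pvValidChords) :
    pvEmitChord b c = b ++ (pvBSplit c).2 := by
  rcases hb with hb | hb <;> subst hb <;> fin_cases hc <;> decide

theorem pv_sum_flat (f : String → Int) (rest : List (String × List String)) :
    (List.map (fun x => (List.map f x.2).sum) rest).sum
      = (List.map f (List.flatMap (fun sec => sec.2) rest)).sum := by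
  rw [List.map_flatMap, List.flatMap_def, List.sum_flatten, List.map_map]; rfl

-- A's nested accumulation loop is a sum over the flattened chord list
theorem pv_nested_add (song : List (String × List String)) (f : String → Int) (a : Int) :
    song.foldl (fun tot sec => sec.2.foldl (fun t c => t + f c) tot) a
      = a + ((song.flatMap (fun sec => sec.2)).map f).sum := by
  induction song generalizing a with
  | nil => simp
  | cons sec rest ih =>
    simp only [List.foldl_cons, PySem.List.foldl_add, List.flatMap_cons, List.map_append,
      List.sum_append]
    rw [pv_sum_flat]
    ring

-- B's nested histogram loop is a fold over the flattened chord list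
theorem pv_foldl_flat {α : Type} (song : List (String × List String)) (f : α → String → α)
    (init : α) :
    song.foldl (fun a sec => sec.2.foldl f a) init
      = (song.flatMap (fun sec => sec.2)).foldl f init := by
  induction song generalizing init with
  | nil => rfl
  | cons sec rest ih => simp [List.foldl_append, ih]

-- incrementing one histogram bucket raises the dot product by that bucket's weight
theorem pv_dot_set (counts : List Int) (w : List Int) (j : Nat) (hj : j < counts.length)
    (hw : counts.length = w.length) :
    pvBDot (counts.set j (counts.getD j 0 + 1)) w = pvBDot counts w + w.getD j 0 := by
  induction counts generalizing w j with
  | nil => simp at hj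
  | cons n ns ih =>
    cases w with
    | nil => simp at hw
    | cons w0 ws =>
      cases j with
      | zero => simp [pvBDot]; ring
      | succ j =>
        have hrec := ih ws j (by simpa using hj) (by simpa using hw)
        simp only [List.set_cons_succ, List.getD_cons_succ, pvBDot, List.zipWith_cons_cons,
          List.sum_cons] at *
        omega

-- folding the histogram over a chord list adds each chord's weight to the dot product
theorem pv_hist_dot (l : List String) (hv : ∀ c ∈ l, c ∈ pvValidChords)
    (counts w : List Int) (hc : counts.length = 12) (hw : w.length = 12) :
    pvBDot (l.foldl pvBInc counts) w
      = pvBDot counts w + (l.map (fun c => w.getD (pvBIdx (pvBSplit c).1).toNat 0)).sum := by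
  induction l generalizing counts with
  | nil => simp
  | cons c cs ih =>
    have hj : (pvBIdx (pvBSplit c).1).toNat < 12 := pv_idx_lt c (hv c (by simp))
    rw [List.foldl_cons, ih (fun x hx => hv x (by simp [hx])) _ (by simp [pvBInc, hc]),
      pvBInc, pv_dot_set counts w _ (by omega) (by omega)]
    simp only [List.map_cons, List.sum_cons]
    ring

-- one modify on the entry just appended at the back, all earlier keys distinct
theorem pv_modify_last (its : List (String × List String)) (k : String) (v : List String)
    (g : List String → List String) (hk : ∀ p ∈ its, p.1 ≠ k) :
    PySem.Dict.modify (PySem.Dict.mk (its ++ [(k, v)])) k [] g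
      = PySem.Dict.mk (its ++ [(k, g v)]) := by
  have hfind : List.find? (fun p => p.1 == k) (its ++ [(k, v)]) = some (k, v) := by
    induction its with
    | nil => simp
    | cons p rest ih =>
      have h1 : (p.1 == k) = false := by simp [hk p (by simp)]
      simp only [List.cons_append, List.find?_cons, h1]
      exact ih fun q hq => hk q (by simp [hq])
  have hc : (PySem.Dict.mk (its ++ [(k, v)])).contains k = true := by
    simp [PySem.Dict.contains]
  have hmap : List.map (fun p => if (p.1 == k) = true then (k, g v) else p) (its ++ [(k, v)])
      = its ++ [(k, g v)] := by
    rw [List.map_append]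
    congr 1
    · have h2 : ∀ p ∈ its, (if (p.1 == k) = true then (k, g v) else p) = id p :=
        fun p hp => by simp [hk p hp]
      rw [List.map_congr_left h2, List.map_id]
    · simp
  simp only [PySem.Dict.modify, PySem.Dict.getD, PySem.Dict.get?, hfind, Option.map_some,
    Option.getD_some, PySem.Dict.insert, hc, if_true, hmap]

-- inserting a key no existing entry carries appends it at the back
theorem pv_insert_fresh (its : List (String × List String)) (k : String)
    (hk : ∀ p ∈ its, p.1 ≠ k) :
    PySem.Dict.insert (PySem.Dict.mk its) k ([] : List String)
      = PySem.Dict.mk (its ++ [(k, [])]) := by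
  have hc : (PySem.Dict.mk its).contains k = false := by
    simp only [PySem.Dict.contains, List.any_eq_false]
    intro p hp; simp [hk p hp]
  simp [PySem.Dict.insert, hc]

-- the append loop on the section just inserted at the back only touches that entry
theorem pv_modify_fresh_last (l : List String) (f : String → String)
    (its : List (String × List String)) (k : String) (v : List String)
    (hk : ∀ p ∈ its, p.1 ≠ k) :
    l.foldl (fun d c => PySem.Dict.modify d k [] (fun xs => xs ++ [f c]))
        (PySem.Dict.mk (its ++ [(k, v)]))
      = PySem.Dict.mk (its ++ [(k, v ++ l.map f)]) := by
  induction l generalizing v with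
  | nil => simp
  | cons c cs ih =>
    rw [List.foldl_cons, pv_modify_last its k v _ hk, ih (v ++ [f c])]
    simp

-- A's dict-building loop over fresh, pairwise-distinct section names is the in-order map
theorem pv_emit_outer (song : List (String × List String)) (f : String → String)
    (its : List (String × List String))
    (hk : ∀ sec ∈ song, ∀ p ∈ its, p.1 ≠ sec.1)
    (hnd : (song.map Prod.fst).Nodup) :
    song.foldl (fun d sec =>
        sec.2.foldl (fun d c => PySem.Dict.modify d sec.1 [] (fun xs => xs ++ [f c]))
          (PySem.Dict.insert d sec.1 []))
      (PySem.Dict.mk its)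
      = PySem.Dict.mk (its ++ song.map (fun sec => (sec.1, sec.2.map f))) := by
  induction song generalizing its with
  | nil => simp
  | cons sec rest ih =>
    rw [List.map_cons, List.nodup_cons] at hnd
    have hk1 : ∀ p ∈ its, p.1 ≠ sec.1 := fun p hp => hk sec (by simp) p hp
    rw [List.foldl_cons, pv_insert_fresh its sec.1 hk1, pv_modify_fresh_last sec.2 f its sec.1 [] hk1]
    have hnd1 : sec.1 ∉ rest.map Prod.fst := hnd.1
    rw [ih (its ++ [(sec.1, [] ++ sec.2.map f)])
      (fun s hs p hp => by
        rcases List.mem_append.mp hp with hp | hp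
        · exact hk s (by simp [hs]) p hp
        · have hps : p.1 = sec.1 := by
            rcases List.mem_singleton.mp hp with rfl; rfl
          rw [hps]
          intro h
          exact hnd1 (h ▸ List.mem_map_of_mem hs)
        )
      hnd.2]
    simp

-- ===== VERDICT (by name: the statement is the Claim_ definition above) =====
theorem transpose_to_easy_key_spec : Claim_equal_transpose_to_easy_key := by
  intro song hdom hpre
  obtain ⟨hnd, hval⟩ := hpre
  have hmem : ∀ c ∈ song.flatMap (fun sec => sec.2), c ∈ pvValidChords := by
    intro c hc
    obtain ⟨sec, hs, hc⟩ := List.mem_flatMap.mp hc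
    exact hval sec hs c hc
  -- B's histogram-dot scores coincide with A's per-key totals
  have hdotG : pvBDot (song.foldl (fun counts sec => sec.2.foldl pvBInc counts)
        (List.replicate 12 (0:Int))) (pvBCostTable [7, 9, 11, 0, 2, 4, 6])
      = pvTotal song ["G","Am","Bm","C","D","Em","F#dim"] := by
    rw [pv_foldl_flat, pv_hist_dot _ hmem _ _ (by simp) (by decide), pvTotal, pv_nested_add]
    have : pvBDot (List.replicate 12 (0:Int)) (pvBCostTable [7, 9, 11, 0, 2, 4, 6]) = 0 := by decide
    rw [this]
    simp only [zero_add]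
    exact congrArg List.sum (List.map_congr_left fun c hc => (pv_score_g c (hmem c hc)).symm)
  have hdotC : pvBDot (song.foldl (fun counts sec => sec.2.foldl pvBInc counts)
        (List.replicate 12 (0:Int))) (pvBCostTable [0, 2, 4, 5, 7, 9, 11])
      = pvTotal song ["C","Dm","Em","F","G","Am","Bdim"] := by
    rw [pv_foldl_flat, pv_hist_dot _ hmem _ _ (by simp) (by decide), pvTotal, pv_nested_add]
    have : pvBDot (List.replicate 12 (0:Int)) (pvBCostTable [0, 2, 4, 5, 7, 9, 11]) = 0 := by decide
    rw [this]
    simp only [zero_add]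
    exact congrArg List.sum (List.map_congr_left fun c hc => (pv_score_c c (hmem c hc)).symm)
  have hbest : (pvBestKey song).1.getD ""
      = (if pvTotal song ["C","Dm","Em","F","G","Am","Bdim"] < pvTotal song ["G","Am","Bm","C","D","Em","F#dim"] then "C" else "G") := by
    simp only [pvBestKey, pvEasyKeys, List.foldl_cons, List.foldl_nil]
    split <;> rfl
  unfold Spec_transpose_to_easy_key transpose_to_easy_key transpose_to_easy_key_alt
  simp only []
  rw [pv_emit_outer song (pvEmitChord ((pvBestKey song).1.getD "")) [] (by simp) hnd]
  rw [hdotG, hdotC, hbest]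
  by_cases hlt : pvTotal song ["C","Dm","Em","F","G","Am","Bdim"]
      < pvTotal song ["G","Am","Bm","C","D","Em","F#dim"]
  all_goals
    simp only [hlt, if_pos, if_false, List.nil_append]
    refine Prod.ext ?_ ?_
    · first | decide | (simp only []; decide)
    · simp only []
      refine List.map_congr_left fun sec hs => ?_
      refine Prod.ext rfl ?_
      exact List.map_congr_left fun c hcm =>
        pv_emit _ c (by simp) (hval sec hs c hcm)
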